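-- pv_equiv track=rewrite | github.com/tomasgoncalves02/TP1-CPD | paralela.py | find_max_prime_in_range
-- ===== SOURCE A (Python) =====
-- def is_prime(n):
--     """Check if n is prime."""
--     if n <= 1:
--         return False
--     elif n <= 3:
--         return True
--     elif n % 2 == 0 or n % 3 == 0:
--         return False
--     i = 5
--     while i * i <= n:
--         if n % i == 0 or n % (i + 2) == 0:
--             return False
--         i += 6
--     return True
--
-- def find_max_prime_in_range(min_number, max_number):
--     """Finds the largest prime in the given range."""
--     max_prime = 0
--     for number in range(max_number, min_number - 1, -1):
--         if is_prime(number):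
--             max_prime = number
--             break
--         if number % 2 == 0:
--             number -= 1
--     return max_prime
-- ===== SOURCE B (Python) =====
-- def _core(n):
--     """Divisor test by 6k+-1 trial divisors (for candidates with no factor 2 or 3)."""
--     i = 5
--     while i * i <= n:
--         if n % i == 0 or n % (i + 2) == 0:
--             return False
--         i += 6
--     return True
--
-- def _wheel(c, lo):
--     """Descending scan over 6k+-1 candidates starting at candidate c; 0 if none >= lo."""
--     while c >= lo and c >= 5:
--         if _core(c):
--             return c
--         c -= 4 if c % 6 == 5 else 2
--     return 0
--
-- def find_max_prime_in_range(min_number, max_number):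
--     """Finds the largest prime in the given range (6k+-1 wheel + explicit 2/3 endgame)."""
--     r = max_number % 6
--     c = max_number if r == 5 else (max_number - 1 if r == 0 else max_number - (r - 1))
--     p = _wheel(c, min_number)
--     if p:
--         return p
--     if min_number <= 3 <= max_number:
--         return 3
--     if min_number <= 2 <= max_number:
--         return 2
--     return 0
-- ===== Notes on version B (the rewrite author's own statement) =====
-- stated objective: alternative
-- what changed: B enumerates only 6k±1 wheel candidates descending (testing them with just the trial-divisor core loop, no parity/mod-3 prechecks) and handles 3 and 2 in an explicit endgame, instead of A's scan that runs the full is_prime on every number in the range.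
import Mathlib
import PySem

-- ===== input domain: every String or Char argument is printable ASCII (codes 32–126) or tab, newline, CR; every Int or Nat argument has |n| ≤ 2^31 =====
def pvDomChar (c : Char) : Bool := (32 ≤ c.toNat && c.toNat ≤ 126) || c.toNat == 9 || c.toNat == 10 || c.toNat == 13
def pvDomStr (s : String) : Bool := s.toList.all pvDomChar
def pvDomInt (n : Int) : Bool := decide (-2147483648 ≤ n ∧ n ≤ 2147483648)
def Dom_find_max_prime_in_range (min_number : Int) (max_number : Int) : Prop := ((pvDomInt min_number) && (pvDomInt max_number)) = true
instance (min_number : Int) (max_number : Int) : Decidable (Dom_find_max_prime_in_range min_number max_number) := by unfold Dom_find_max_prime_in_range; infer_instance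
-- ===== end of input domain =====

-- B searches descending over 6k±1 wheel candidates only (with an explicit 2/3 endgame) instead of A's test-every-number scan with the full is_prime; same result, different enumeration.

-- ===== PORT A =====
-- shared helper: is_prime, byte-for-byte the same in Source A and Source B
def is_prime_loop (n : Int) (i : Nat) : Bool :=
  if ((i : Int)) * i ≤ n then
    if n % (i : Int) == 0 || n % ((i : Int) + 2) == 0 then false
    else is_prime_loop n (i + 6)
  else true
termination_by (n + 1 - (i : Int) * i).toNat
decreasing_by
  push_cast
  have h2 : ((i : Int) + 6) * ((i : Int) + 6) = (i : Int) * (i : Int) + 12 * (i : Int) + 36 := by ring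
  rw [h2]
  have hi : (0 : Int) ≤ (i : Int) := Int.natCast_nonneg i
  generalize (i : Int) * (i : Int) = a at *
  omega

def is_prime (n : Int) : Bool :=
  if n ≤ 1 then false
  else if n ≤ 3 then true
  else if n % 2 == 0 || n % 3 == 0 then false
  else is_prime_loop n 5

-- A's for-loop with break, iterating the (lazy) range(max_number, min_number-1, -1)
-- downwards one number at a time; the dead 'if number % 2 == 0: number -= 1' only
-- rebinds the loop variable, which the next iteration overwrites
def goA (number min_number max_prime : Int) : Int :=
  if number < min_number then max_prime
  else if is_prime number then number   -- max_prime = number; break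
  else goA (number - 1) min_number (if number % 2 == 0 then max_prime else max_prime)
termination_by (number - min_number + 1).toNat
decreasing_by omega

def find_max_prime_in_range (min_number : Int) (max_number : Int) : Int :=
  goA max_number min_number 0

-- ===== PORT B =====
-- Source B's _wheel: descending scan over 6k±1 candidates starting at candidate c; 0 if none >= lo.
-- its _core(c) is byte-identical to is_prime's divisor loop, so it is ported as is_prime_loop c 5
def wheel (c lo : Int) : Int :=
  if lo ≤ c ∧ 5 ≤ c then
    if is_prime_loop c 5 then c
    else wheel (c - (if c % 6 == 5 then 4 else 2)) lo
  else 0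
termination_by (c - lo + 1).toNat
decreasing_by
  split <;> omega

def find_max_prime_in_range_alt (min_number : Int) (max_number : Int) : Int :=
  let r := max_number % 6
  let c := if r == 5 then max_number else if r == 0 then max_number - 1 else max_number - (r - 1)
  let p := wheel c min_number
  if p ≠ 0 then p
  else if min_number ≤ 3 ∧ 3 ≤ max_number then 3
  else if min_number ≤ 2 ∧ 2 ≤ max_number then 2
  else 0

-- ===== PRECONDITION & SPEC =====
def Spec_find_max_prime_in_range (min_number : Int) (max_number : Int) (out : Int) : Prop := out = find_max_prime_in_range_alt min_number max_number
instance (min_number : Int) (max_number : Int) (out : Int) : Decidable (Spec_find_max_prime_in_range min_number max_number out) := by unfold Spec_find_max_prime_in_range; infer_instance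

-- ===== CLAIM (what is proved, stated in full; the proofs are below) =====
def Claim_equal_find_max_prime_in_range : Prop := ∀ (min_number : Int) (max_number : Int), Dom_find_max_prime_in_range min_number max_number → Spec_find_max_prime_in_range min_number max_number (find_max_prime_in_range min_number max_number)

-- ===== LEMMAS AND PROOFS =====

-- B's endgame for 3 and 2, as a named helper for the proofs
def epil (mn c : Int) : Int :=
  if mn ≤ 3 ∧ 3 ≤ c then 3 else if mn ≤ 2 ∧ 2 ≤ c then 2 else 0

lemma epil_congr (mn c c' : Int) (h : 3 ≤ c) (h' : 3 ≤ c') : epil mn c = epil mn c' := by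
  unfold epil; split_ifs <;> omega

lemma wheel_eq (c lo : Int) :
    wheel c lo = if lo ≤ c ∧ 5 ≤ c then
      (if is_prime_loop c 5 then c
       else wheel (c - (if c % 6 == 5 then 4 else 2)) lo)
    else 0 := by
  conv_lhs => unfold wheel

lemma isprime_small (n : Int) (h : n ≤ 1) : is_prime n = false := by
  simp [is_prime, h]

lemma isprime_composite (n : Int) (h3 : 3 < n) (h : n % 2 = 0 ∨ n % 3 = 0) :
    is_prime n = false := by
  have hb : (n % 2 == 0 || n % 3 == 0) = true := by
    rcases h with h | h <;> simp [h]
  simp [is_prime, show ¬(n ≤ 1) by omega, show ¬(n ≤ 3) by omega, hb]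

lemma isprime_cand (n : Int) (h5 : 5 ≤ n) (h2 : n % 2 ≠ 0) (h3 : n % 3 ≠ 0) :
    is_prime n = is_prime_loop n 5 := by
  have e2 : (n % 2 == 0) = false := by simp [h2]
  have e3 : (n % 3 == 0) = false := by simp [h3]
  simp [is_prime, show ¬(n ≤ 1) by omega, show ¬(n ≤ 3) by omega, e2, e3]

lemma core_five : is_prime_loop 5 5 = true := by
  rw [is_prime_loop]; norm_num

lemma goA_skip (n mn acc : Int) (h : is_prime n = false) :
    goA n mn acc = goA (n - 1) mn acc := by
  by_cases hlt : n < mn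
  · rw [goA, if_pos hlt, goA, if_pos (by omega)]
  · rw [goA, if_neg hlt]
    simp [h]

theorem goA_none (n mn acc : Int) (h : n ≤ 1) : goA n mn acc = acc := by
  by_cases hlt : n < mn
  · rw [goA, if_pos hlt]
  · rw [goA_skip n mn acc (isprime_small n h)]
    exact goA_none (n - 1) mn acc (by omega)
termination_by (n - mn + 1).toNat
decreasing_by omega

lemma goA_two (mn acc : Int) : goA 2 mn acc = if 2 < mn then acc else 2 := by
  rw [goA]; simp [show is_prime 2 = true by decide]

lemma goA_three (mn acc : Int) : goA 3 mn acc = if 3 < mn then acc else 3 := by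
  rw [goA]; simp [show is_prime 3 = true by decide]

lemma goA_le4 (mx mn : Int) (h : mx ≤ 4) : goA mx mn 0 = epil mn mx := by
  have hc : mx ≤ 1 ∨ mx = 2 ∨ mx = 3 ∨ mx = 4 := by omega
  rcases hc with h1 | h2 | h3 | h4
  · rw [goA_none mx mn 0 h1]; unfold epil; split_ifs <;> omega
  · subst h2; rw [goA_two]; unfold epil; split_ifs <;> omega
  · subst h3; rw [goA_three]; unfold epil; split_ifs <;> omega
  · subst h4
    rw [goA, show is_prime 4 = false by decide]
    simp only [Bool.false_eq_true, if_false, ite_self]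
    by_cases hlt : (4:Int) < mn
    · rw [if_pos hlt]; unfold epil; split_ifs <;> omega
    · rw [if_neg hlt, show (4:Int) - 1 = 3 by norm_num, goA_three]; unfold epil; split_ifs <;> omega

-- A's one-by-one descent, restricted to a stretch of composites, may jump over it
lemma goA_skip_upto (k : Nat) (c mn acc : Int)
    (h : ∀ d : Int, c < d → d ≤ c + k → is_prime d = false) :
    goA (c + k) mn acc = goA c mn acc := by
  induction k with
  | zero => norm_num
  | succ m ih =>
    have h1 : is_prime (c + ((m : Int) + 1)) = false := by
      apply h <;> push_cast <;> omega
    rw [show ((m + 1 : Nat) : Int) = (m : Int) + 1 by push_cast; ring] at *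
    rw [goA_skip _ mn acc h1, show c + ((m : Int) + 1) - 1 = c + (m : Int) by ring]
    exact ih (fun d hd1 hd2 => h d hd1 (by omega))

-- the wheel over 6k±1 candidates computes exactly what A's descent from the same candidate computes
theorem wheel_corr (c mn : Int) (hc : c % 6 = 1 ∨ c % 6 = 5) :
    goA c mn 0 = (if wheel c mn ≠ 0 then wheel c mn else epil mn c) := by
  by_cases h5 : c < 5
  · have hc1 : c ≤ 1 := by omega
    rw [goA_none c mn 0 hc1, wheel_eq, if_neg (by omega)]
    unfold epil; split_ifs <;> omega
  · by_cases hmn : c < mn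
    · rw [goA, if_pos hmn, wheel_eq, if_neg (by omega)]
      unfold epil; split_ifs <;> omega
    · by_cases hcore : is_prime_loop c 5
      · have hw : wheel c mn = c := by
          rw [wheel_eq, if_pos ⟨by omega, by omega⟩, if_pos hcore]
        rw [goA, if_neg (by omega), isprime_cand c (by omega) (by omega) (by omega), hcore]
        rw [hw]
        simp [show c ≠ 0 by omega]
      · have hpf : is_prime c = false := by
          rw [isprime_cand c (by omega) (by omega) (by omega)]
          simpa using hcore
        rcases hc with hc1 | hc5
        · -- c ≡ 1 (mod 6), c ≥ 7: skip the single multiple of 6 at c-1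
          have h7 : 7 ≤ c := by omega
          have hw : wheel c mn = wheel (c - 2) mn := by
            rw [wheel_eq, if_pos ⟨by omega, by omega⟩, if_neg (by simpa using hcore),
              show (if c % 6 == 5 then (4:Int) else 2) = 2 by simp [hc1]]
          rw [goA_skip c mn 0 hpf, goA_skip (c - 1) mn 0 (isprime_composite _ (by omega) (by omega)),
            show c - 1 - 1 = c - 2 by ring]
          rw [wheel_corr (c - 2) mn (by omega), hw,
            epil_congr mn (c - 2) c (by omega) (by omega)]
        · -- c ≡ 5 (mod 6): either c = 5 (but core 5 = true) or c ≥ 11: skip c-1, c-2, c-3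
          by_cases hce : c = 5
          · exact absurd (hce ▸ core_five) (by simpa using hcore)
          · have h11 : 11 ≤ c := by omega
            have hw : wheel c mn = wheel (c - 4) mn := by
              rw [wheel_eq, if_pos ⟨by omega, by omega⟩, if_neg (by simpa using hcore),
                show (if c % 6 == 5 then (4:Int) else 2) = 4 by simp [hc5]]
            rw [goA_skip c mn 0 hpf,
              goA_skip (c - 1) mn 0 (isprime_composite _ (by omega) (by omega)),
              show c - 1 - 1 = c - 2 by ring,
              goA_skip (c - 2) mn 0 (isprime_composite _ (by omega) (by omega)),
              show c - 2 - 1 = c - 3 by ring,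
              goA_skip (c - 3) mn 0 (isprime_composite _ (by omega) (by omega)),
              show c - 3 - 1 = c - 4 by ring]
            rw [wheel_corr (c - 4) mn (by omega), hw,
              epil_congr mn (c - 4) c (by omega) (by omega)]
termination_by (c - mn + 1).toNat
decreasing_by all_goals omega

-- top-level correspondence when a wheel candidate c ≥ 5 sits at most a few composites below mx
lemma goA_top (mn mx c : Int) (hc : c % 6 = 1 ∨ c % 6 = 5) (h5 : 5 ≤ c) (hle : c ≤ mx)
    (hskip : ∀ d : Int, c < d → d ≤ mx → is_prime d = false) :
    goA mx mn 0 = if wheel c mn ≠ 0 then wheel c mn else epil mn mx := by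
  have h := goA_skip_upto (mx - c).toNat c mn 0
    (fun d h1 h2 => hskip d h1 (by omega))
  rw [show c + (((mx - c).toNat : Nat) : Int) = mx by omega] at h
  rw [h, wheel_corr c mn hc, epil_congr mn c mx (by omega) (by omega)]

-- top-level correspondence when mx ≤ 4 (the wheel never runs; B's endgame decides)
lemma goA_top_small (mn mx c : Int) (hmx : mx ≤ 4) (hc1 : c ≤ 1) :
    goA mx mn 0 = if wheel c mn ≠ 0 then wheel c mn else epil mn mx := by
  rw [wheel_eq, if_neg (by omega)]
  exact goA_le4 mx mn hmx

-- ===== VERDICT (by name: the statement is the Claim_ definition above) =====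
theorem find_max_prime_in_range_spec : Claim_equal_find_max_prime_in_range := by
  intro mn mx _
  unfold Spec_find_max_prime_in_range find_max_prime_in_range find_max_prime_in_range_alt
  show goA mx mn 0 =
    (if wheel (if mx % 6 == 5 then mx else if mx % 6 == 0 then mx - 1 else mx - (mx % 6 - 1)) mn ≠ 0
     then wheel (if mx % 6 == 5 then mx else if mx % 6 == 0 then mx - 1 else mx - (mx % 6 - 1)) mn
     else epil mn mx)
  by_cases h5 : mx % 6 = 5
  · rw [show (if mx % 6 == 5 then mx else if mx % 6 == 0 then mx - 1 else mx - (mx % 6 - 1)) = mx by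
      simp [h5]]
    by_cases hx : 5 ≤ mx
    · exact goA_top mn mx mx (Or.inr h5) (by omega) le_rfl
        (fun d h1 h2 => absurd h2 (by omega))
    · exact goA_top_small mn mx mx (by omega) (by omega)
  · by_cases h0 : mx % 6 = 0
    · rw [show (if mx % 6 == 5 then mx else if mx % 6 == 0 then mx - 1 else mx - (mx % 6 - 1)) = mx - 1 by
        simp [h0]]
      by_cases hx : 5 ≤ mx
      · exact goA_top mn mx (mx - 1) (Or.inr (by omega)) (by omega) (by omega)
          (fun d h1 h2 => isprime_composite d (by omega) (by omega))
      · exact goA_top_small mn mx (mx - 1) (by omega) (by omega)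
    · rw [show (if mx % 6 == 5 then mx else if mx % 6 == 0 then mx - 1 else mx - (mx % 6 - 1)) = mx - (mx % 6 - 1) by
        simp [h5, h0]]
      by_cases hx : 5 ≤ mx
      · exact goA_top mn mx (mx - (mx % 6 - 1)) (Or.inl (by omega)) (by omega) (by omega)
          (fun d h1 h2 => isprime_composite d (by omega) (by omega))
      · exact goA_top_small mn mx (mx - (mx % 6 - 1)) (by omega) (by omega)
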